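-- pv_equiv track=rewrite | github.com/Leecw0610/Private_Study | algorithm/PythonSources/Algorithm.2.8_Strassen.py | conquer
-- ===== SOURCE A (Python) =====
-- def madd (A, B):
--     n = len(A)
--     C = [[0] * n for _ in range(n)]
--     for i in range(n):
--         for j in range(n):
--             C[i][j] = A[i][j] + B[i][j]
--     return C
--
-- def msub (A, B):
--     n = len(A)
--     C = [[0] * n for _ in range(n)]
--     for i in range(n):
--         for j in range(n):
--             C[i][j] = A[i][j] - B[i][j]
--     return C
--
-- def conquer(M1, M2, M3, M4, M5, M6, M7):
--     C11 = madd(msub(madd(M1, M4), M5), M7)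
--     C12 = madd(M3, M5)
--     C21 = madd(M2, M4)
--     C22 = madd(msub(madd(M1, M3), M2), M6)
--     m = len(C11)
--     n = 2 * m
--     C = [[0] * n for _ in range(n)]
--     for i in range(m):
--         for j in range(m):
--             C[i][j] = C11[i][j]
--             C[i][j + m] = C12[i][j]
--             C[i + m][j] = C21[i][j]
--             C[i + m][j + m] = C22[i][j]
--     return C
-- ===== SOURCE B (Python) =====
-- # Table-driven: one loop over all 2m x 2m output cells; each cell is a signed
-- # linear combination of the seven inputs selected by a quadrant coefficient table.
-- _COEFFS = {
--     (False, False): ((0, 1), (3, 1), (4, -1), (6, 1)),   # C11 = M1 + M4 - M5 + M7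
--     (False, True):  ((2, 1), (4, 1)),                    # C12 = M3 + M5
--     (True, False):  ((1, 1), (3, 1)),                    # C21 = M2 + M4
--     (True, True):   ((0, 1), (2, 1), (1, -1), (5, 1)),   # C22 = M1 + M3 - M2 + M6
-- }
--
-- def conquer(M1, M2, M3, M4, M5, M6, M7):
--     Ms = (M1, M2, M3, M4, M5, M6, M7)
--     m = len(M1)
--     n = 2 * m
--     return [[sum(c * Ms[k][i % m][j % m] for k, c in _COEFFS[(i >= m, j >= m)])
--              for j in range(n)] for i in range(n)]
-- ===== Notes on version B (the rewrite author's own statement) =====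
-- stated objective: alternative
-- what changed: Replaces A's staged pipeline (madd/msub building four intermediate quadrant matrices, then a copy loop into a preallocated zero matrix) with a table-driven scheme: a quadrant-keyed coefficient table and one loop over all 2m x 2m output cells, each computed as a signed linear combination of the seven inputs via modular indexing.
import Mathlib
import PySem

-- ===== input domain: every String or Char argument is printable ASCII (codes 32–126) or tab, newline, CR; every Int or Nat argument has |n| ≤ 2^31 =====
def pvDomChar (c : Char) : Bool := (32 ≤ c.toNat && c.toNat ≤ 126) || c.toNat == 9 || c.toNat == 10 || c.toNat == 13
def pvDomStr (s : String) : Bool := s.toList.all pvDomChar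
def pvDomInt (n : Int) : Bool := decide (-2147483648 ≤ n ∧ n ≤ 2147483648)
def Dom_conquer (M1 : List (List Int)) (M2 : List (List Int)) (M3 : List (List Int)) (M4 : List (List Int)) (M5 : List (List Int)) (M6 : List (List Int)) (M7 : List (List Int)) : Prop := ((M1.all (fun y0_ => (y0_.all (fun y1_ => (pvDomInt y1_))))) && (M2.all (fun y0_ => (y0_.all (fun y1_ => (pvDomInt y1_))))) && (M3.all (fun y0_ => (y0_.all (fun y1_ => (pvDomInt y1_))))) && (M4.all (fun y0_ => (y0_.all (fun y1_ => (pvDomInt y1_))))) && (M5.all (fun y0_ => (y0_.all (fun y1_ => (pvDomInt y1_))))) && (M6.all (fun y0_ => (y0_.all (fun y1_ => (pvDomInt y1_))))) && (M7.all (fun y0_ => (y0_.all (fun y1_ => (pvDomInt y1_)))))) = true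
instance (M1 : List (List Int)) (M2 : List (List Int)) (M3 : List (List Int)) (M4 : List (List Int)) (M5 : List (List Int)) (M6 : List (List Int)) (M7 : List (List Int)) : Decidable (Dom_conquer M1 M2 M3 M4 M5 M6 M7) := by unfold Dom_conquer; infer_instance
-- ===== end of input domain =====

-- B replaces A's staged quadrant pipeline (madd/msub intermediates + copy into a zero matrix) by a
-- quadrant coefficient table and one pass over all output cells (objective: alternative).

-- ===== PORT A =====
-- Python `M[i][j]` for nonnegative indices; under Pre_conquer every access is in range, so the
-- getD defaults are never read.
def pvGet2 (M : List (List Int)) (i j : Nat) : Int := (M.getD i []).getD j 0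

-- literal port of madd: n = len(A); C[i][j] = A[i][j] + B[i][j] for i,j < n
def pvMadd (A B : List (List Int)) : List (List Int) :=
  (List.range A.length).map (fun i => (List.range A.length).map (fun j => pvGet2 A i j + pvGet2 B i j))

-- literal port of msub
def pvMsub (A B : List (List Int)) : List (List Int) :=
  (List.range A.length).map (fun i => (List.range A.length).map (fun j => pvGet2 A i j - pvGet2 B i j))

-- A's final loop writes each of the 4m^2 cells of the zero matrix exactly once; the port gives the
-- resulting matrix cell by cell (quadrant selected by the i<m / j<m tests matching the write offsets).
def conquer (M1 : List (List Int)) (M2 : List (List Int)) (M3 : List (List Int)) (M4 : List (List Int)) (M5 : List (List Int)) (M6 : List (List Int)) (M7 : List (List Int)) : List (List Int) :=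
  let C11 := pvMadd (pvMsub (pvMadd M1 M4) M5) M7
  let C12 := pvMadd M3 M5
  let C21 := pvMadd M2 M4
  let C22 := pvMadd (pvMsub (pvMadd M1 M3) M2) M6
  let m := C11.length
  (List.range (2 * m)).map (fun i => (List.range (2 * m)).map (fun j =>
    if i < m then
      (if j < m then pvGet2 C11 i j else pvGet2 C12 i (j - m))
    else
      (if j < m then pvGet2 C21 (i - m) j else pvGet2 C22 (i - m) (j - m))))

-- ===== PORT B =====
-- the _COEFFS dict of Source B, keyed by the quadrant booleans (i >= m, j >= m)
def pvCoeffs (bi bj : Bool) : List (Nat × Int) :=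
  match bi, bj with
  | false, false => [(0, 1), (3, 1), (4, -1), (6, 1)]
  | false, true  => [(2, 1), (4, 1)]
  | true,  false => [(1, 1), (3, 1)]
  | true,  true  => [(0, 1), (2, 1), (1, -1), (5, 1)]

-- Python's sum() over the generator = left fold from 0 in table order
def conquer_alt (M1 : List (List Int)) (M2 : List (List Int)) (M3 : List (List Int)) (M4 : List (List Int)) (M5 : List (List Int)) (M6 : List (List Int)) (M7 : List (List Int)) : List (List Int) :=
  let Ms : List (List (List Int)) := [M1, M2, M3, M4, M5, M6, M7]
  let m := M1.length
  (List.range (2 * m)).map (fun i => (List.range (2 * m)).map (fun j =>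
    (pvCoeffs (decide (m ≤ i)) (decide (m ≤ j))).foldl
      (fun acc kc => acc + kc.2 * pvGet2 (Ms.getD kc.1 []) (i % m) (j % m)) 0))

-- ===== PRECONDITION & SPEC =====
-- pvRows M k n: M has at least k rows and each of its first k rows has at least n entries
def pvRows (M : List (List Int)) (k n : Nat) : Prop :=
  k ≤ M.length ∧ ∀ i < k, n ≤ (M.getD i []).length

-- Pre_: exactly the shapes on which A's indexing stays in range, i.e. exactly the inputs on which
-- the Python A returns normally (on every other input A raises IndexError).
def Pre_conquer (M1 : List (List Int)) (M2 : List (List Int)) (M3 : List (List Int)) (M4 : List (List Int)) (M5 : List (List Int)) (M6 : List (List Int)) (M7 : List (List Int)) : Prop :=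
  pvRows M1 M1.length M1.length ∧ pvRows M4 M1.length M1.length ∧
  pvRows M5 M1.length M1.length ∧ pvRows M7 M1.length M1.length ∧
  pvRows M3 M3.length M3.length ∧ pvRows M5 M3.length M3.length ∧
  pvRows M2 M2.length M2.length ∧ pvRows M4 M2.length M2.length ∧
  pvRows M3 M1.length M1.length ∧ pvRows M2 M1.length M1.length ∧ pvRows M6 M1.length M1.length
instance (M1 : List (List Int)) (M2 : List (List Int)) (M3 : List (List Int)) (M4 : List (List Int)) (M5 : List (List Int)) (M6 : List (List Int)) (M7 : List (List Int)) : Decidable (Pre_conquer M1 M2 M3 M4 M5 M6 M7) := by unfold Pre_conquer pvRows; infer_instance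

def pvWitness_conquer : List (List Int) × List (List Int) × List (List Int) × List (List Int) × List (List Int) × List (List Int) × List (List Int) :=
  ([[1, 2], [3, 4]], [[5, 6], [7, 8]], [[1, 0], [0, 1]], [[2, 2], [2, 2]], [[0, 1], [1, 0]], [[3, 3], [3, 3]], [[4, 0], [0, 4]])

def Spec_conquer (M1 : List (List Int)) (M2 : List (List Int)) (M3 : List (List Int)) (M4 : List (List Int)) (M5 : List (List Int)) (M6 : List (List Int)) (M7 : List (List Int)) (out : List (List Int)) : Prop := out = conquer_alt M1 M2 M3 M4 M5 M6 M7
instance (M1 : List (List Int)) (M2 : List (List Int)) (M3 : List (List Int)) (M4 : List (List Int)) (M5 : List (List Int)) (M6 : List (List Int)) (M7 : List (List Int)) (out : List (List Int)) : Decidable (Spec_conquer M1 M2 M3 M4 M5 M6 M7 out) := by unfold Spec_conquer; infer_instance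

-- ===== CLAIM (what is proved, stated in full; the proofs are below) =====
def Claim_equal_conquer : Prop := ∀ (M1 : List (List Int)) (M2 : List (List Int)) (M3 : List (List Int)) (M4 : List (List Int)) (M5 : List (List Int)) (M6 : List (List Int)) (M7 : List (List Int)), Dom_conquer M1 M2 M3 M4 M5 M6 M7 → Pre_conquer M1 M2 M3 M4 M5 M6 M7 → Spec_conquer M1 M2 M3 M4 M5 M6 M7 (conquer M1 M2 M3 M4 M5 M6 M7)

-- ===== LEMMAS AND PROOFS =====
theorem pvMadd_length (A B : List (List Int)) : (pvMadd A B).length = A.length := by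
  simp [pvMadd]

theorem pvMsub_length (A B : List (List Int)) : (pvMsub A B).length = A.length := by
  simp [pvMsub]

theorem pvGet2_range_map (f : Nat → Nat → Int) (n i j : Nat) (hi : i < n) (hj : j < n) :
    pvGet2 ((List.range n).map (fun i => (List.range n).map (fun j => f i j))) i j = f i j := by
  simp [pvGet2, List.getD_eq_getElem?_getD, hi, hj]

theorem pvGet2_madd (A B : List (List Int)) (i j : Nat) (hi : i < A.length) (hj : j < A.length) :
    pvGet2 (pvMadd A B) i j = pvGet2 A i j + pvGet2 B i j := by
  exact pvGet2_range_map (fun i j => pvGet2 A i j + pvGet2 B i j) A.length i j hi hj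

theorem pvGet2_msub (A B : List (List Int)) (i j : Nat) (hi : i < A.length) (hj : j < A.length) :
    pvGet2 (pvMsub A B) i j = pvGet2 A i j - pvGet2 B i j := by
  exact pvGet2_range_map (fun i j => pvGet2 A i j - pvGet2 B i j) A.length i j hi hj

theorem conquer_core (M1 M2 M3 M4 M5 M6 M7 : List (List Int)) (m : Nat)
    (e1 : M1.length = m) (e2 : m ≤ M2.length) (e3 : m ≤ M3.length) :
    conquer M1 M2 M3 M4 M5 M6 M7 = conquer_alt M1 M2 M3 M4 M5 M6 M7 := by
  simp only [conquer, conquer_alt, pvMadd_length, pvMsub_length, e1]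
  refine List.map_congr_left ?_
  intro i hi
  have hi2 : i < 2 * m := List.mem_range.mp hi
  refine List.map_congr_left ?_
  intro j hj
  have hj2 : j < 2 * m := List.mem_range.mp hj
  have hm : 0 < m := by omega
  by_cases hi' : i < m <;> by_cases hj' : j < m
  · rw [if_pos hi', if_pos hj']
    have di : decide (m ≤ i) = false := by simp; omega
    have dj : decide (m ≤ j) = false := by simp; omega
    rw [di, dj, Nat.mod_eq_of_lt hi', Nat.mod_eq_of_lt hj']
    rw [pvGet2_madd _ _ _ _ (by simp [pvMsub_length, pvMadd_length, e1, hi']) (by simp [pvMsub_length, pvMadd_length, e1, hj'])]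
    rw [pvGet2_msub _ _ _ _ (by simp [pvMadd_length, e1, hi']) (by simp [pvMadd_length, e1, hj'])]
    rw [pvGet2_madd _ _ _ _ (e1 ▸ hi') (e1 ▸ hj')]
    simp [pvCoeffs, List.foldl, List.getD]
    ring
  · rw [if_pos hi', if_neg hj']
    have di : decide (m ≤ i) = false := by simp; omega
    have dj : decide (m ≤ j) = true := by simp; omega
    have hjm : j % m = j - m := by
      rw [Nat.mod_eq_sub_mod (by omega), Nat.mod_eq_of_lt (by omega)]
    rw [di, dj, Nat.mod_eq_of_lt hi', hjm]
    rw [pvGet2_madd _ _ _ _ (lt_of_lt_of_le hi' e3) (by omega : j - m < M3.length)]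
    simp [pvCoeffs, List.foldl, List.getD]
  · rw [if_neg hi', if_pos hj']
    have di : decide (m ≤ i) = true := by simp; omega
    have dj : decide (m ≤ j) = false := by simp; omega
    have him : i % m = i - m := by
      rw [Nat.mod_eq_sub_mod (by omega), Nat.mod_eq_of_lt (by omega)]
    rw [di, dj, him, Nat.mod_eq_of_lt hj']
    rw [pvGet2_madd _ _ _ _ (by omega : i - m < M2.length) (lt_of_lt_of_le hj' e2)]
    simp [pvCoeffs, List.foldl, List.getD]
  · rw [if_neg hi', if_neg hj']
    have di : decide (m ≤ i) = true := by simp; omega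
    have dj : decide (m ≤ j) = true := by simp; omega
    have him : i % m = i - m := by
      rw [Nat.mod_eq_sub_mod (by omega), Nat.mod_eq_of_lt (by omega)]
    have hjm : j % m = j - m := by
      rw [Nat.mod_eq_sub_mod (by omega), Nat.mod_eq_of_lt (by omega)]
    rw [di, dj, him, hjm]
    rw [pvGet2_madd _ _ _ _ (by simp [pvMsub_length, pvMadd_length, e1]; omega) (by simp [pvMsub_length, pvMadd_length, e1]; omega)]
    rw [pvGet2_msub _ _ _ _ (by simp [pvMadd_length, e1]; omega) (by simp [pvMadd_length, e1]; omega)]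
    rw [pvGet2_madd _ _ _ _ (by omega : i - m < M1.length) (by omega : j - m < M1.length)]
    simp [pvCoeffs, List.foldl, List.getD]
    ring

-- ===== VERDICT (by name: the statement is the Claim_ definition above) =====
theorem conquer_spec : Claim_equal_conquer := by
  intro M1 M2 M3 M4 M5 M6 M7 _ hpre
  obtain ⟨_, _, _, _, _, _, _, _, h3m, h2m, _⟩ := hpre
  exact conquer_core M1 M2 M3 M4 M5 M6 M7 M1.length rfl h2m.1 h3m.1
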